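-- pv_equiv track=rewrite | github.com/kalinpetrovbg/SoftUni-Python | Python Advanced/Functions Advanced/Lab/08. Expressions.py | make_expressions
-- ===== SOURCE A (Python) =====
-- def make_expressions(list_nums, expression='', total=0):
--     if not list_nums:
--         return [(expression, total)]
--     plus = make_expressions(
--         list_nums[1:], expression=f'{expression}+{list_nums[0]}', total=total + list_nums[0])
--     minus = make_expressions(
--         list_nums[1:], expression=f'{expression}-{list_nums[0]}', total=total - list_nums[0])
--
--     return plus + minus
-- ===== SOURCE B (Python) =====
-- def make_expressions(list_nums, expression='', total=0):
--     results = [(expression, total)]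
--     for num in list_nums:
--         new_results = []
--         for e, t in results:
--             new_results.append((f'{e}+{num}', t + num))
--             new_results.append((f'{e}-{num}', t - num))
--         results = new_results
--     return results
-- ===== Notes on version B (the rewrite author's own statement) =====
-- stated objective: alternative
-- what changed: Replaces the binary recursion (two recursive calls per element, concatenating sublists) with a single iterative breadth-first pass that repeatedly expands an accumulator list, each (expr,total) pair becoming its '+' and '-' extensions.
import Mathlib
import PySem

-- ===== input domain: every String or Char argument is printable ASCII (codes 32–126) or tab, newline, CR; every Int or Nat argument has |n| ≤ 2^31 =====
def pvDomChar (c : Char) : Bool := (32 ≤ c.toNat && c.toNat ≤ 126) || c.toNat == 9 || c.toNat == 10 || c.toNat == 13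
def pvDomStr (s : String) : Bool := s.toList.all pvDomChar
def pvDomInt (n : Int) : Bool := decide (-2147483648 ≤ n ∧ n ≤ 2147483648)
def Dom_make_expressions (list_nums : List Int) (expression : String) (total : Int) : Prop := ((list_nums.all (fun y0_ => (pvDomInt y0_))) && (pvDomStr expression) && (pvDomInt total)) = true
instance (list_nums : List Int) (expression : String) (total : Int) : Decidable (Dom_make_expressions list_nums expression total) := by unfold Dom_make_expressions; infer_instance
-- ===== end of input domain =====

-- B replaces A's binary recursion with one iterative accumulator-expansion pass (same output, same cost).

-- ===== PORT A =====
def make_expressions : List Int → String → Int → List (String × Int)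
  | [], expression, total => [(expression, total)]
  | n :: rest, expression, total =>
    let plus := make_expressions rest (expression ++ "+" ++ PySem.Int.toStr n) (total + n)
    let minus := make_expressions rest (expression ++ "-" ++ PySem.Int.toStr n) (total - n)
    plus ++ minus

-- ===== PORT B =====
-- each pair in the accumulator expands to its '+' extension followed by its '-' extension
def pvExpand (results : List (String × Int)) (num : Int) : List (String × Int) :=
  results.flatMap (fun p =>
    [(p.1 ++ "+" ++ PySem.Int.toStr num, p.2 + num),
     (p.1 ++ "-" ++ PySem.Int.toStr num, p.2 - num)])

def make_expressions_alt (list_nums : List Int) (expression : String) (total : Int) : List (String × Int) :=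
  list_nums.foldl pvExpand [(expression, total)]

-- ===== PRECONDITION & SPEC =====
def Spec_make_expressions (list_nums : List Int) (expression : String) (total : Int) (out : List (String × Int)) : Prop := out = make_expressions_alt list_nums expression total
instance (list_nums : List Int) (expression : String) (total : Int) (out : List (String × Int)) : Decidable (Spec_make_expressions list_nums expression total out) := by unfold Spec_make_expressions; infer_instance

-- ===== CLAIM (what is proved, stated in full; the proofs are below) =====
def Claim_equal_make_expressions : Prop := ∀ (list_nums : List Int) (expression : String) (total : Int), Dom_make_expressions list_nums expression total → Spec_make_expressions list_nums expression total (make_expressions list_nums expression total)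

-- ===== LEMMAS AND PROOFS =====

-- the iterative expansion of any accumulator equals flat-mapping A's recursion over it
theorem foldl_pvExpand (nums : List Int) (acc : List (String × Int)) :
    nums.foldl pvExpand acc = acc.flatMap (fun p => make_expressions nums p.1 p.2) := by
  induction nums generalizing acc with
  | nil => simp [make_expressions]
  | cons n rest ih =>
    simp only [List.foldl_cons, ih, pvExpand, List.flatMap_assoc]
    simp [make_expressions]

-- ===== VERDICT (by name: the statement is the Claim_ definition above) =====
theorem make_expressions_spec : Claim_equal_make_expressions := by
  intro nums e t _
  unfold Spec_make_expressions make_expressions_alt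
  simp [foldl_pvExpand]
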